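-- pv_equiv track=rewrite | github.com/newjini/Algo_study | Python/Prog_비밀지도.py | solution
-- ===== SOURCE A (Python) =====
-- def solution(n, arr1, arr2):
--     answer = []
--     for x, y in zip(arr1, arr2):
--         ans = bin(x | y)[2:]
--         ans = ans.zfill(n)
--         answer.append(ans)
--     for i in range(len(answer)):
--         answer[i] = answer[i].replace("1","#")
--         answer[i] = answer[i].replace("0"," ")
--         ### a.zfill(n) 문자열 타입에서 원하는 개수만큼 0 채우기
--
--     return answer
-- ===== SOURCE B (Python) =====
-- def solution(n, arr1, arr2):
--     rows = []
--     for x, y in zip(arr1, arr2):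
--         v = x | y
--         cells = []
--         while v:
--             cells.append('#' if v & 1 else ' ')
--             v >>= 1
--         if not cells:
--             cells.append(' ')  # zero still has one binary digit
--         rows.append(''.join(reversed(cells)).rjust(n))
--     return rows
-- ===== Notes on version B (the rewrite author's own statement) =====
-- stated objective: alternative
-- what changed: Replaces the bin()/slice/zfill/replace string pipeline by arithmetic digit extraction: a loop peels bits LSB-first with v & 1 / v >>= 1 into a cell list ('#'/' '), which is reversed and left-padded with rjust(n); Pre_ restricts to the puzzle's natural domain of nonnegative row values, since on a negative value B's digit loop does not terminate while A returns a string containing a literal 'b'.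
-- outside the precondition, e.g. on solution(3, [-1], [0]): A returns [' b#'], B does not finish within the time limit
import Mathlib
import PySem

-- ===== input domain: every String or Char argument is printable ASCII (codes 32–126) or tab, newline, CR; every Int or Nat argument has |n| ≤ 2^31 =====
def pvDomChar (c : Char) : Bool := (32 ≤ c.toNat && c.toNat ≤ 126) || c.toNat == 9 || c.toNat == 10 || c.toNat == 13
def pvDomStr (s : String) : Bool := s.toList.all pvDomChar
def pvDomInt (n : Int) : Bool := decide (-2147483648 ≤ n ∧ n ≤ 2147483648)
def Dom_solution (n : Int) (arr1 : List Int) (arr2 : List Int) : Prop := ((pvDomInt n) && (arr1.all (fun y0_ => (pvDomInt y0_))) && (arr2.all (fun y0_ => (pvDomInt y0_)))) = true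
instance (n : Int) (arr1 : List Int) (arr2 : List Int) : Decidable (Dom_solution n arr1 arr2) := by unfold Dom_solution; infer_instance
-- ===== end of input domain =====

-- B replaces A's bin()/slice/zfill/replace string pipeline by arithmetic digit
-- extraction (LSB-first bit loop, reverse, rjust); equivalence is claimed on the
-- puzzle's natural domain of nonnegative row values (objective: alternative).

-- ===== PORT A =====
def solution (n : Int) (arr1 : List Int) (arr2 : List Int) : List String :=
  let answer := (List.zip arr1 arr2).foldl
    (fun acc xy =>
      let ans := PySem.Str.slice (PySem.Int.pyBin (PySem.Int.bor xy.1 xy.2)) (some 2) none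
      acc ++ [PySem.Str.zfill ans n]) []
  -- 'for i in range(len(answer)): answer[i] = …' rewrites every slot in place: a map
  answer.map (fun s => PySem.Str.replace (PySem.Str.replace s "1" "#") "0" " ")

-- ===== PORT B =====
-- 'while v: cells.append(…); v >>= 1' — on v ≤ 0 the Python loop does not run (v = 0)
-- or does not terminate (v < 0, excluded by Pre_); the guard 'v ≤ 0 → []' only makes
-- the recursion total, it is exact wherever the Python loop terminates.
def pvCells (v : Int) : List Char :=
  if h : v ≤ 0 then []
  else (if PySem.Int.band v 1 = 1 then '#' else ' ') :: pvCells (PySem.Int.floordiv v 2)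
termination_by v.toNat
decreasing_by
  have h2 : PySem.Int.floordiv v 2 = v / 2 := PySem.Int.floordiv_eq_ediv_of_pos (by omega)
  simp only [h2]
  omega

-- ''.join(reversed(cells)).rjust(n): left-pad with ' ' to width n (exact; no truncation)
def pvRjust (cs : List Char) (w : Int) : List Char :=
  List.replicate ((w - (cs.length : Int)).toNat) ' ' ++ cs

def solution_alt (n : Int) (arr1 : List Int) (arr2 : List Int) : List String :=
  (List.zip arr1 arr2).foldl
    (fun rows xy =>
      let v := PySem.Int.bor xy.1 xy.2
      let cells := pvCells v
      let cells2 := if cells = [] then [' '] else cells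
      rows ++ [String.ofList (pvRjust cells2.reverse n)]) []

-- ===== PRECONDITION & SPEC =====
-- Pre_ restricts to the puzzle's natural domain: nonnegative row values. On a pair with
-- a negative value (x | y < 0) A returns a row containing a literal 'b' from bin()'s
-- '-0b' prefix, while B's digit loop does not terminate there.
def Pre_solution (n : Int) (arr1 : List Int) (arr2 : List Int) : Prop :=
  ∀ p ∈ List.zip arr1 arr2, 0 ≤ p.1 ∧ 0 ≤ p.2
instance (n : Int) (arr1 : List Int) (arr2 : List Int) : Decidable (Pre_solution n arr1 arr2) := by unfold Pre_solution; infer_instance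

def pvWitness_solution : Int × List Int × List Int := (5, [9, 20, 28, 18, 11], [30, 1, 21, 17, 28])

def Spec_solution (n : Int) (arr1 : List Int) (arr2 : List Int) (out : List String) : Prop := out = solution_alt n arr1 arr2
instance (n : Int) (arr1 : List Int) (arr2 : List Int) (out : List String) : Decidable (Spec_solution n arr1 arr2 out) := by unfold Spec_solution; infer_instance

-- ===== CLAIM (what is proved, stated in full; the proofs are below) =====
def Claim_equal_solution : Prop := ∀ (n : Int) (arr1 : List Int) (arr2 : List Int), Dom_solution n arr1 arr2 → Pre_solution n arr1 arr2 → Spec_solution n arr1 arr2 (solution n arr1 arr2)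

-- ===== LEMMAS AND PROOFS =====

def pvSym (c : Char) : Char := if c = '1' then '#' else if c = '0' then ' ' else c

lemma pvReplace_go_single (o d : Char) :
    ∀ (fuel : Nat) (l acc : List Char), l.length ≤ fuel →
      PySem.Chars.replace.go [o] [d] fuel l acc
        = acc.reverse ++ l.map (fun c => if c = o then d else c) := by
  intro fuel
  induction fuel with
  | zero =>
    intro l acc h
    have : l = [] := by cases l <;> simp_all
    subst this
    simp [PySem.Chars.replace.go]
  | succ f ih =>
    intro l acc h
    cases l with
    | nil => simp [PySem.Chars.replace.go]
    | cons c t =>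
      simp only [PySem.Chars.replace.go]
      by_cases hc : c = o
      · subst hc
        have hp : [c].isPrefixOf (c :: t) = true := by simp [List.isPrefixOf]
        rw [if_pos hp]
        simp only [List.length_cons, List.length_nil, List.drop_succ_cons, List.drop_zero]
        simp only [List.length_cons] at h
        rw [ih _ _ (by omega)]
        simp
      · have hp : [o].isPrefixOf (c :: t) = false := by
          simp [List.isPrefixOf]; exact fun hh => (hc hh.symm).elim
        rw [if_neg (by simp [hp])]
        simp only [List.length_cons] at h
        rw [ih _ _ (by omega)]
        simp [hc]

lemma pvReplace_single (s : List Char) (o d : Char) :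
    PySem.Chars.replace s [o] [d] = s.map (fun c => if c = o then d else c) := by
  rw [PySem.Chars.replace]
  simp [pvReplace_go_single o d s.length s [] (le_refl _)]

lemma pvReplace_chain (s : List Char) :
    PySem.Chars.replace (PySem.Chars.replace s ['1'] ['#']) ['0'] [' '] = s.map pvSym := by
  rw [pvReplace_single, pvReplace_single, List.map_map]
  refine List.map_congr_left ?_
  intro c _
  simp only [Function.comp, pvSym]
  by_cases h1 : c = '1' <;> by_cases h0 : c = '0' <;> simp_all

lemma pvZfill_nosign (cs : List Char) (n : Int) (h : cs ≠ [])
    (h2 : cs.head? ≠ some '+') (h3 : cs.head? ≠ some '-') :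
    PySem.Chars.zfill cs n = List.replicate (n.toNat - cs.length) '0' ++ cs := by
  rw [PySem.Chars.zfill.eq_def]
  by_cases hle : n ≤ (cs.length : Int)
  · rw [if_pos hle]
    have : n.toNat - cs.length = 0 := by omega
    simp [this]
  · rw [if_neg hle]
    cases cs with
    | nil => simp at h
    | cons c rest =>
      simp only [List.head?] at h2 h3
      show (if c = '+' ∨ c = '-' then c :: (List.replicate (n.toNat - (c :: rest).length) '0' ++ rest)
            else List.replicate (n.toNat - (c :: rest).length) '0' ++ c :: rest)
          = List.replicate (n.toNat - (c :: rest).length) '0' ++ c :: rest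
      rw [if_neg (by simp_all)]

def pvG (m : Nat) : List Char :=
  if _ : m < 2 then [Nat.digitChar m] else pvG (m / 2) ++ [Nat.digitChar (m % 2)]
decreasing_by exact Nat.div_lt_self (by omega) (by omega)

lemma pvToDigitsCore (fuel n : Nat) (ds : List Char) (h : n < fuel) :
    Nat.toDigitsCore 2 fuel n ds = pvG n ++ ds := by
  induction fuel generalizing n ds with
  | zero => omega
  | succ f ih =>
    rw [Nat.toDigitsCore]
    by_cases h2 : n / 2 = 0
    · simp only [h2]
      rw [pvG]
      have hn : n < 2 := by omega
      rw [dif_pos hn]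
      have : n % 2 = n := Nat.mod_eq_of_lt hn
      simp [this]
    · simp only [h2]
      rw [ih _ _ (by omega)]
      conv_rhs => rw [pvG]
      rw [dif_neg (by omega)]
      simp

lemma pvToDigits_eq_g (m : Nat) : Nat.toDigits 2 m = pvG m := by
  rw [Nat.toDigits]
  simpa using pvToDigitsCore (m + 1) m [] (by omega)

set_option maxRecDepth 4096 in
lemma pvG_chars (m : Nat) : ∀ c ∈ pvG m, c = '0' ∨ c = '1' := by
  induction m using Nat.strong_induction_on with
  | _ m ih =>
    rw [pvG]
    by_cases h2 : m < 2
    · rw [dif_pos h2]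
      interval_cases m <;> simp [Nat.digitChar]
    · rw [dif_neg h2]
      intro c hc
      rcases List.mem_append.mp hc with h | h
      · exact ih (m / 2) (by omega) c h
      · have : m % 2 = 0 ∨ m % 2 = 1 := by omega
        rcases this with hm | hm <;> simp [hm, Nat.digitChar] at h <;> simp [h]

lemma pvG_ne_nil (m : Nat) : pvG m ≠ [] := by
  rw [pvG]
  by_cases h2 : m < 2
  · rw [dif_pos h2]; simp
  · rw [dif_neg h2]; simp

lemma pvHeadNoSign (cs : List Char) (h : ∀ c ∈ cs, c = '0' ∨ c = '1') :
    cs.head? ≠ some '+' ∧ cs.head? ≠ some '-' := by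
  cases cs with
  | nil => simp
  | cons c t =>
    have := h c (by simp)
    constructor <;> simp only [List.head?] <;> intro hh <;> simp at hh <;> simp [hh] at this

lemma pvCells_zero : pvCells 0 = [] := by
  unfold pvCells; simp

lemma pvCells_pos (m : Nat) (h : 0 < m) :
    pvCells (m : Int) = (if m % 2 = 1 then '#' else ' ') :: pvCells ((m / 2 : Nat) : Int) := by
  rw [pvCells.eq_def]
  rw [dif_neg (by exact_mod_cast Nat.not_le.mpr h)]
  have hb : PySem.Int.band (m : Int) 1 = ((m &&& 1 : Nat) : Int) := by
    exact_mod_cast PySem.Int.band_natCast m 1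
  have hd : PySem.Int.floordiv (m : Int) 2 = ((m / 2 : Nat) : Int) := by
    exact_mod_cast PySem.Int.floordiv_natCast m 2
  rw [hb, hd]
  have hmod : m &&& 1 = m % 2 := Nat.and_one_is_mod m
  congr 1
  have : m % 2 = 0 ∨ m % 2 = 1 := by omega
  rcases this with hm | hm <;> simp [hmod, hm]

lemma pvCells_ne_nil (m : Nat) (h : 0 < m) : pvCells (m : Int) ≠ [] := by
  rw [pvCells_pos m h]; simp

-- B's reversed cell list (with the empty case mapped to [' ']) is exactly A's
-- translated digit string of m.
lemma pvCells_reverse_eq (m : Nat) :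
    (if pvCells (m : Int) = [] then [' '] else pvCells (m : Int)).reverse
      = (pvG m).map pvSym := by
  induction m using Nat.strong_induction_on with
  | _ m ih =>
    by_cases h0 : m = 0
    · subst h0
      rw [pvG]
      simp [pvCells_zero, pvSym, Nat.digitChar]
    · rw [if_neg (pvCells_ne_nil m (by omega)), pvCells_pos m (by omega)]
      by_cases h2 : m < 2
      · have h1 : m = 1 := by omega
        subst h1
        rw [pvG]
        simp [pvCells_zero, pvSym, Nat.digitChar]
      · rw [pvG, dif_neg (by omega)]
        have hpos : 0 < m / 2 := by omega
        have ihh := ih (m / 2) (by omega)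
        rw [if_neg (pvCells_ne_nil (m / 2) hpos)] at ihh
        rw [List.reverse_cons, ihh, List.map_append]
        congr 1
        have : m % 2 = 0 ∨ m % 2 = 1 := by omega
        rcases this with hm | hm <;> simp [hm, Nat.digitChar, pvSym]

def pvRowA (n v : Int) : String :=
  PySem.Str.replace (PySem.Str.replace
    (PySem.Str.zfill (PySem.Str.slice (PySem.Int.pyBin v) (some 2) none) n) "1" "#") "0" " "

def pvRowB (n v : Int) : String :=
  String.ofList (pvRjust (if pvCells v = [] then [' '] else pvCells v).reverse n)

lemma pvRow_eq (n : Int) (m : Nat) : pvRowA n (m : Int) = pvRowB n (m : Int) := by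
  apply String.toList_inj.mp
  unfold pvRowA pvRowB
  rw [String.toList_ofList]
  rw [PySem.Str.toList_replace, PySem.Str.toList_replace, PySem.Str.toList_zfill,
    PySem.Str.toList_slice, PySem.Int.toList_pyBin]
  have h1 : "1".toList = ['1'] := by decide
  have h2 : "#".toList = ['#'] := by decide
  have h0 : "0".toList = ['0'] := by decide
  have hsp : " ".toList = [' '] := by decide
  simp only [h1, h2, h0, hsp]
  rw [PySem.Chars.slice_eq_listSlice,
    PySem.List.slice_from (PySem.Int.toBinChars0b (m : Int)) (a := 2) (by omega)]
  have hnlt : ¬ (m : Int) < 0 := by omega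
  rw [PySem.Int.toBinChars0b, if_neg hnlt]
  have hdrop : List.drop (2 : Int).toNat ('0' :: 'b' :: Nat.toDigits 2 (m : Int).toNat)
      = Nat.toDigits 2 (m : Int).toNat := by rfl
  rw [hdrop]
  have htn : (m : Int).toNat = m := Int.toNat_natCast m
  rw [htn, pvToDigits_eq_g]
  have hns := pvHeadNoSign (pvG m) (pvG_chars m)
  rw [pvZfill_nosign _ _ (pvG_ne_nil m) hns.1 hns.2]
  rw [pvReplace_chain, List.map_append, List.map_replicate]
  have hsym0 : pvSym '0' = ' ' := by decide
  rw [hsym0, pvRjust, pvCells_reverse_eq m]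
  congr 1
  congr 1
  simp only [List.length_map]
  omega

-- ===== VERDICT (by name: the statement is the Claim_ definition above) =====
theorem solution_spec : Claim_equal_solution := by
  intro n arr1 arr2 _ hpre
  unfold Spec_solution solution solution_alt
  show ((List.zip arr1 arr2).foldl
      (fun acc xy => acc ++ [PySem.Str.zfill
        (PySem.Str.slice (PySem.Int.pyBin (PySem.Int.bor xy.1 xy.2)) (some 2) none) n]) []).map
        (fun s => PySem.Str.replace (PySem.Str.replace s "1" "#") "0" " ")
      = (List.zip arr1 arr2).foldl
          (fun rows xy => rows ++ [pvRowB n (PySem.Int.bor xy.1 xy.2)]) []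
  rw [PySem.List.foldl_append_singleton_eq_map, PySem.List.foldl_append_singleton_eq_map]
  simp only [List.nil_append, List.map_map]
  refine List.map_congr_left (fun xy hxy => ?_)
  obtain ⟨hx, hy⟩ := hpre xy hxy
  have hbor : PySem.Int.bor xy.1 xy.2 = ((xy.1.toNat ||| xy.2.toNat : Nat) : Int) :=
    PySem.Int.bor_of_nonneg hx hy
  show pvRowA n (PySem.Int.bor xy.1 xy.2) = pvRowB n (PySem.Int.bor xy.1 xy.2)
  rw [hbor]
  exact pvRow_eq n _
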